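-- pv_equiv track=rewrite | github.com/ulab-uiuc/multi-agent-evolve-clean | absolute_zero_reasoner/rewards/custom_evaluate.py | fix_fracs
-- ===== SOURCE A (Python) =====
-- def fix_fracs(string: str) -> str:
--     substrs = string.split("\\frac")
--     new_str = substrs[0]
--     if len(substrs) > 1:
--         substrs = substrs[1:]
--         for substr in substrs:
--             new_str += "\\frac"
--             if substr[0] == "{":
--                 new_str += substr
--             else:
--                 try:
--                     assert len(substr) >= 2
--                 except AssertionError:
--                     return string
--                 a = substr[0]
--                 b = substr[1]
--                 if b != "{":
--                     if len(substr) > 2: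
--                         post_substr = substr[2:]
--                         new_str += "{" + a + "}{" + b + "}" + post_substr
--                     else:
--                         new_str += "{" + a + "}{" + b + "}"
--                 else:
--                     if len(substr) > 2:
--                         post_substr = substr[2:]
--                         new_str += "{" + a + "}" + b + post_substr
--                     else:
--                         new_str += "{" + a + "}" + b
--     string = new_str
--     return string
-- ===== SOURCE B (Python) =====
-- def fix_fracs(string: str) -> str:
--     # Single left-to-right scan with an index pointer instead of split():
--     # copy up to each "\frac", then patch the following characters in place.
--     out = []
--     pos = 0
--     while True:
--         i = string.find("\\frac", pos)
--         if i == -1: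
--             out.append(string[pos:])
--             return "".join(out)
--         out.append(string[pos:i])
--         out.append("\\frac")
--         pos = i + 5
--         if pos < len(string) and string[pos] == "{":
--             continue  # already braced: the segment is copied verbatim by the next round
--         j = string.find("\\frac", pos)
--         seg_end = j if j != -1 else len(string)
--         if seg_end - pos < 2:
--             return string  # malformed argument: give up, keep the original
--         a, b = string[pos], string[pos + 1]
--         out.append("{" + a + "}{" + b + "}" if b != "{" else "{" + a + "}{")
--         pos += 2
-- ===== Notes on version B (the rewrite author's own statement) =====
-- stated objective: alternative
-- what changed: B replaces A's str.split('\frac') plus a per-segment accumulating loop by a single left-to-right scan with an index pointer and str.find, copying up to each '\frac' and patching the following one or two characters in place.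
import Mathlib
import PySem

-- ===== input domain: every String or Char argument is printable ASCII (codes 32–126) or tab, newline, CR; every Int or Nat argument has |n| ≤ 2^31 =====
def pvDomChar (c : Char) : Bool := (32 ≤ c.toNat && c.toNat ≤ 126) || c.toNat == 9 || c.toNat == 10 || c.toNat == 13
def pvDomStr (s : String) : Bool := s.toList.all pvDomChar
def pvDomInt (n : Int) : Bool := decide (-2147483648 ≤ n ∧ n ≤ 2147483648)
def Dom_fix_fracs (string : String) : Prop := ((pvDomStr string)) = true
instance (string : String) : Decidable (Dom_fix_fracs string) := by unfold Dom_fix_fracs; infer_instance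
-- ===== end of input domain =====

-- B replaces A's str.split("\frac") plus per-segment fold by a single left-to-right
-- find-based scan with an index pointer (objective: alternative decomposition, same cost).

-- the token "\frac" as a character list (shared constant)
def pvTok : List Char := ['\\', 'f', 'r', 'a', 'c']

-- ===== PORT A =====
-- index of the leftmost occurrence of "\frac" in cs (helper for the hand port of
-- str.split; exact: str.split(sep) cuts at leftmost non-overlapping occurrences)
def findTok : List Char → Option Nat
  | [] => none
  | c :: t => if pvTok.isPrefixOf (c :: t) then some 0 else (findTok t).map (· + 1)

-- hand port of string.split("\\frac") (exact for this fixed nonempty separator);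
-- fuel makes the recursion structural, fuel = cs.length + 1 is always enough
def splitTokF : Nat → List Char → List (List Char)
  | 0, cs => [cs]
  | fuel + 1, cs =>
    match findTok cs with
    | none => [cs]
    | some i => cs.take i :: splitTokF fuel (cs.drop (i + 5))

-- A's per-segment branch: the text appended after "\frac" for this segment;
-- none = A's early `return string` (caught AssertionError on len(substr) < 2;
-- for the empty segment Python raises IndexError instead — excluded by Pre_)
def pieceA (s : List Char) : Option (List Char) :=
  match s with
  | [] => none
  | a :: s' =>
    if a = '{' then some (a :: s')
    else
      match s' with
      | [] => none
      | b :: t =>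
        if b ≠ '{' then
          if t.length > 0 then some ('{' :: a :: '}' :: '{' :: b :: '}' :: t)
          else some ['{', a, '}', '{', b, '}']
        else
          if t.length > 0 then some ('{' :: a :: '}' :: b :: t)
          else some ['{', a, '}', b]

-- A's for-loop over the tail segments: the text appended after substrs[0]
-- (none propagates the early `return string`)
def procA : List (List Char) → Option (List Char)
  | [] => some []
  | s :: rest =>
    match pieceA s with
    | none => none
    | some p =>
      match procA rest with
      | none => none
      | some t => some (pvTok ++ p ++ t)

def fix_fracs (string : String) : String :=
  match splitTokF (string.toList.length + 1) string.toList with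
  | [] => string   -- unreachable: split never returns an empty list
  | s0 :: rest =>
    match procA rest with
    | none => string                    -- A's `return string`
    | some t => String.ofList (s0 ++ t)

-- ===== PORT B =====
-- Source B's while-loop: scan from the current position (here: the remaining list),
-- copy up to the next "\frac", patch what follows, continue; none = `return string`.
-- The three `none` branches below are exactly Source B's `seg_end - pos < 2` test
-- ([] : 0 chars left, [x] : 1 char left, some 0 / some 1 : next "\frac" too close).
def loopBF : Nat → List Char → Option (List Char)
  | 0, _ => none
  | fuel + 1, cs =>
    match findTok cs with
    | none => some cs
    | some i =>
      match cs.drop (i + 5) with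
      | [] => none
      | a :: rest' =>
        if a = '{' then
          (loopBF fuel (a :: rest')).map (fun r => cs.take i ++ pvTok ++ r)
        else
          match rest' with
          | [] => none
          | b :: t =>
            match findTok (a :: b :: t) with
            | some 0 => none
            | some 1 => none
            | _ =>
              if b ≠ '{' then
                (loopBF fuel t).map (fun r => cs.take i ++ pvTok ++ ('{' :: a :: '}' :: '{' :: b :: '}' :: []) ++ r)
              else
                (loopBF fuel t).map (fun r => cs.take i ++ pvTok ++ ('{' :: a :: '}' :: '{' :: []) ++ r)

def fix_fracs_alt (string : String) : String :=
  match loopBF (string.toList.length + 1) string.toList with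
  | none => string
  | some r => String.ofList r

-- ===== PRECONDITION & SPEC =====
-- positions of all occurrences of "\frac" ("\frac" cannot overlap itself)
def pvOccs (cs : List Char) : List Nat :=
  (List.range cs.length).filter (fun p => pvTok.isPrefixOf (cs.drop p))

-- length of the text between occurrence m and the next occurrence (or the end)
def pvSegLen (cs : List Char) (m : Nat) : Nat :=
  (if m + 1 < (pvOccs cs).length then (pvOccs cs).getD (m + 1) 0 else cs.length)
    - ((pvOccs cs).getD m 0 + 5)

-- Pre_ excludes exactly the inputs on which A raises IndexError: some "\frac" is
-- immediately followed by another "\frac" or by the end of the string (an empty split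
-- segment) and no earlier one-character non-brace segment makes A return early first.
def Pre_fix_fracs (string : String) : Prop :=
  ∀ m ∈ List.range (pvOccs string.toList).length,
    pvSegLen string.toList m = 0 →
    ∃ m' ∈ List.range m, pvSegLen string.toList m' = 1 ∧
      string.toList.getD ((pvOccs string.toList).getD m' 0 + 5) ' ' ≠ '{'
instance (string : String) : Decidable (Pre_fix_fracs string) := by unfold Pre_fix_fracs; infer_instance

def pvWitness_fix_fracs : String := "x\\frac12y\\frac{3}{4}"

def Spec_fix_fracs (string : String) (out : String) : Prop := out = fix_fracs_alt string
instance (string : String) (out : String) : Decidable (Spec_fix_fracs string out) := by unfold Spec_fix_fracs; infer_instance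

-- ===== CLAIM (what is proved, stated in full; the proofs are below) =====
def Claim_equal_fix_fracs : Prop := ∀ (string : String), Dom_fix_fracs string → Pre_fix_fracs string → Spec_fix_fracs string (fix_fracs string)

-- ===== LEMMAS AND PROOFS =====

theorem findTok_bound : ∀ (cs : List Char) (i : Nat), findTok cs = some i → i + 5 ≤ cs.length := by
  intro cs
  induction cs with
  | nil => intro i h; simp [findTok] at h
  | cons c t ih =>
    intro i h
    simp only [findTok] at h
    split at h
    · rename_i hp
      have hlen : pvTok.length ≤ (c :: t).length :=
        (List.isPrefixOf_iff_prefix.mp hp).length_le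
      simp only [Option.some.injEq] at h
      subst h
      simp [pvTok] at hlen
      simp only [List.length_cons]
      omega
    · rw [Option.map_eq_some_iff] at h
      obtain ⟨j, hj, rfl⟩ := h
      have := ih j hj
      simp only [List.length_cons]
      omega

theorem findTok_cons_succ (c : Char) (t : List Char) (j : Nat)
    (h : findTok (c :: t) = some (j + 1)) : findTok t = some j := by
  simp only [findTok] at h
  split at h
  · simp at h
  · rw [Option.map_eq_some_iff] at h
    obtain ⟨j', hj', heq⟩ := h
    have hje : j' = j := by omega
    rw [← hje]; exact hj'
    
theorem findTok_cons_none (c : Char) (t : List Char)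
    (h : findTok (c :: t) = none) : findTok t = none := by
  simp only [findTok] at h
  split at h
  · simp at h
  · simpa using h

theorem findTok_zero_head (cs : List Char) (h : findTok cs = some 0) :
    pvTok.isPrefixOf cs = true := by
  cases cs with
  | nil => simp [findTok] at h
  | cons c t =>
    simp only [findTok] at h
    split at h
    · assumption
    · rw [Option.map_eq_some_iff] at h
      obtain ⟨j, _, hj⟩ := h
      omega

theorem not_prefix_of_head (a : Char) (t : List Char) (ha : a ≠ '\\') :
    pvTok.isPrefixOf (a :: t) = false := by
  simp only [pvTok, List.isPrefixOf, Bool.and_eq_false_iff]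
  left
  simpa using fun h => ha h.symm

-- reduction (step) lemmas for the two fuelled loops
theorem split_step_none (f : Nat) (cs : List Char) (h : findTok cs = none) :
    splitTokF (f + 1) cs = [cs] := by simp [splitTokF, h]

theorem split_step_some (f : Nat) (cs : List Char) (i : Nat) (h : findTok cs = some i) :
    splitTokF (f + 1) cs = cs.take i :: splitTokF f (cs.drop (i + 5)) := by
  simp [splitTokF, h]

theorem loopB_step_none (f : Nat) (cs : List Char) (h : findTok cs = none) :
    loopBF (f + 1) cs = some cs := by simp [loopBF, h]

theorem loopB_step_nil (f : Nat) (cs : List Char) (i : Nat) (h : findTok cs = some i)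
    (h2 : cs.drop (i + 5) = []) : loopBF (f + 1) cs = none := by simp [loopBF, h, h2]

theorem loopB_step_brace (f : Nat) (cs : List Char) (i : Nat) (R' : List Char)
    (h : findTok cs = some i) (h2 : cs.drop (i + 5) = '{' :: R') :
    loopBF (f + 1) cs = (loopBF f ('{' :: R')).map (fun r => cs.take i ++ pvTok ++ r) := by
  simp [loopBF, h, h2]

theorem loopB_step_one (f : Nat) (cs : List Char) (i : Nat) (a : Char)
    (h : findTok cs = some i) (h2 : cs.drop (i + 5) = [a]) (ha : a ≠ '{') :
    loopBF (f + 1) cs = none := by simp [loopBF, h, h2, ha]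

theorem loopB_step_tok0 (f : Nat) (cs : List Char) (i : Nat) (a b : Char) (t : List Char)
    (h : findTok cs = some i) (h2 : cs.drop (i + 5) = a :: b :: t) (ha : a ≠ '{')
    (hft : findTok (a :: b :: t) = some 0) : loopBF (f + 1) cs = none := by
  simp [loopBF, h, h2, ha, hft]

theorem loopB_step_tok1 (f : Nat) (cs : List Char) (i : Nat) (a b : Char) (t : List Char)
    (h : findTok cs = some i) (h2 : cs.drop (i + 5) = a :: b :: t) (ha : a ≠ '{')
    (hft : findTok (a :: b :: t) = some 1) : loopBF (f + 1) cs = none := by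
  simp [loopBF, h, h2, ha, hft]

theorem loopB_step_far_none (f : Nat) (cs : List Char) (i : Nat) (a b : Char) (t : List Char)
    (h : findTok cs = some i) (h2 : cs.drop (i + 5) = a :: b :: t) (ha : a ≠ '{')
    (hft : findTok (a :: b :: t) = none) :
    loopBF (f + 1) cs = (loopBF f t).map (fun r => cs.take i ++ pvTok ++
      (if b ≠ '{' then ('{' :: a :: '}' :: '{' :: b :: '}' :: []) else ('{' :: a :: '}' :: '{' :: [])) ++ r) := by
  by_cases hb : b = '{'
  · subst hb; simp [loopBF, h, h2, ha, hft]
  · simp [loopBF, h, h2, ha, hft, hb]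

theorem loopB_step_far2 (f : Nat) (cs : List Char) (i : Nat) (a b : Char) (t : List Char) (j2 : Nat)
    (h : findTok cs = some i) (h2 : cs.drop (i + 5) = a :: b :: t) (ha : a ≠ '{')
    (hft : findTok (a :: b :: t) = some (j2 + 2)) :
    loopBF (f + 1) cs = (loopBF f t).map (fun r => cs.take i ++ pvTok ++
      (if b ≠ '{' then ('{' :: a :: '}' :: '{' :: b :: '}' :: []) else ('{' :: a :: '}' :: '{' :: [])) ++ r) := by
  by_cases hb : b = '{'
  · subst hb; simp [loopBF, h, h2, ha, hft]
  · simp [loopBF, h, h2, ha, hft, hb]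

theorem splitTokF_head (f : Nat) (c : Char) (t : List Char)
    (hnp : pvTok.isPrefixOf (c :: t) = false) :
    ∃ r0 rtail, splitTokF (f + 1) (c :: t) = (c :: r0) :: rtail := by
  cases hfR : findTok (c :: t) with
  | none => exact ⟨t, [], by rw [split_step_none f _ hfR]⟩
  | some j =>
    cases j with
    | zero => rw [findTok_zero_head _ hfR] at hnp; simp at hnp
    | succ j' =>
      exact ⟨t.take j', splitTokF f ((c :: t).drop (j' + 1 + 5)),
        by rw [split_step_some f _ _ hfR, List.take_succ_cons]⟩

theorem pieceA_brace (s : List Char) : pieceA ('{' :: s) = some ('{' :: s) := by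
  simp [pieceA]

theorem pieceA_two (a b : Char) (t : List Char) (ha : a ≠ '{') :
    pieceA (a :: b :: t) =
      if b ≠ '{' then some ('{' :: a :: '}' :: '{' :: b :: '}' :: t)
      else some ('{' :: a :: '}' :: b :: t) := by
  by_cases hb : b = '{' <;> cases t <;> simp [pieceA, ha, hb]

theorem procA_cons (s : List Char) (rest : List (List Char)) :
    procA (s :: rest) = (pieceA s).bind (fun p => (procA rest).map (fun t => pvTok ++ p ++ t)) := by
  cases hp : pieceA s <;> cases hq : procA rest <;> simp [procA, hp, hq]

theorem splitTokF_ne_nil (f : Nat) (cs : List Char) : splitTokF f cs ≠ [] := by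
  cases f with
  | zero => simp [splitTokF]
  | succ f => cases h : findTok cs <;> simp [splitTokF, h]

-- MAIN LEMMA: B's scan computes exactly "first split segment ++ A's appended text"
theorem loopBF_eq : ∀ (fuel : Nat) (cs : List Char), cs.length < fuel →
    ∀ s0 rest, splitTokF fuel cs = s0 :: rest →
    loopBF fuel cs = (procA rest).map (fun r => s0 ++ r) := by
  intro fuel
  induction fuel with
  | zero => intro cs h; omega
  | succ f ih =>
    intro cs hlen s0 rest hsplit
    cases hf : findTok cs with
    | none =>
      rw [split_step_none f cs hf] at hsplit
      obtain ⟨rfl, rfl⟩ : cs = s0 ∧ [] = rest := by simpa using hsplit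
      simp [loopB_step_none f cs hf, procA]
    | some i =>
      have hb := findTok_bound cs i hf
      obtain ⟨f2, rfl⟩ : ∃ f2, f = f2 + 1 := ⟨f - 1, by omega⟩
      rw [split_step_some _ cs i hf] at hsplit
      obtain ⟨rfl, rfl⟩ : cs.take i = s0 ∧ splitTokF (f2 + 1) (cs.drop (i + 5)) = rest := by
        simpa using hsplit
      have hdlen : (cs.drop (i + 5)).length = cs.length - (i + 5) := by simp
      cases hR : cs.drop (i + 5) with
      | nil =>
        rw [loopB_step_nil f2.succ cs i hf hR,
          split_step_none f2 _ (by simp [findTok]), procA_cons]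
        simp [pieceA]
      | cons a R' =>
        by_cases ha : a = '{'
        · subst ha
          have hnp : pvTok.isPrefixOf ('{' :: R') = false := not_prefix_of_head _ _ (by decide)
          obtain ⟨r0, rtail, hsp⟩ := splitTokF_head f2 '{' R' hnp
          have hlR : ('{' :: R').length < f2 + 1 := by rw [← hR, hdlen]; omega
          have hIH := ih ('{' :: R') hlR _ _ hsp
          rw [loopB_step_brace f2.succ cs i R' hf hR, hsp, hIH, procA_cons, pieceA_brace]
          cases hp : procA rtail <;> simp [hp]
        · cases R' with
          | nil =>
            rw [loopB_step_one f2.succ cs i a hf hR ha,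
              split_step_none f2 _ (by simp [findTok, pvTok, List.isPrefixOf]), procA_cons]
            simp [pieceA, ha]
          | cons b t =>
            cases hft : findTok (a :: b :: t) with
            | none =>
              have hft' : findTok t = none :=
                findTok_cons_none _ _ (findTok_cons_none _ _ hft)
              rw [loopB_step_far_none f2.succ cs i a b t hf hR ha hft,
                split_step_none f2 _ hft, procA_cons, pieceA_two a b t ha,
                loopB_step_none f2 t hft']
              by_cases hbb : b = '{' <;> simp [procA, hbb]
            | some j =>
              match j, hft with
              | 0, hft =>
                rw [loopB_step_tok0 f2.succ cs i a b t hf hR ha hft,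
                  split_step_some f2 _ _ hft, procA_cons]
                simp [pieceA]
              | 1, hft =>
                rw [loopB_step_tok1 f2.succ cs i a b t hf hR ha hft,
                  split_step_some f2 _ _ hft, procA_cons]
                simp [pieceA, ha]
              | j2 + 2, hft =>
                have hft2 : findTok t = some j2 :=
                  findTok_cons_succ _ _ _ (findTok_cons_succ _ _ _ hft)
                have hlt : t.length < f2 + 1 := by
                  have : (a :: b :: t).length = cs.length - (i + 5) := by rw [← hR, hdlen]
                  simp at this; omega
                have hsp : splitTokF (f2 + 1) t = t.take j2 :: splitTokF f2 (t.drop (j2 + 5)) :=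
                  split_step_some f2 t j2 hft2
                have hIH := ih t hlt _ _ hsp
                have htake : (a :: b :: t).take (j2 + 2) = a :: b :: t.take j2 := rfl
                have hdrop : (a :: b :: t).drop (j2 + 2 + 5) = t.drop (j2 + 5) := by
                  have h7 : j2 + 2 + 5 = (j2 + 5) + 2 := by omega
                  rw [h7]; rfl
                rw [loopB_step_far2 f2.succ cs i a b t j2 hf hR ha hft,
                  split_step_some f2 _ _ hft, htake, hdrop, procA_cons,
                  pieceA_two a b (t.take j2) ha, hIH]
                by_cases hbb : b = '{' <;>
                  cases hp : procA (splitTokF f2 (t.drop (j2 + 5))) <;> simp [hp, hbb]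

-- ===== VERDICT (by name: the statement is the Claim_ definition above) =====
theorem fix_fracs_spec : Claim_equal_fix_fracs := by
  intro string _ _
  unfold Spec_fix_fracs fix_fracs fix_fracs_alt
  obtain ⟨s0, rest, hs⟩ : ∃ s0 rest, splitTokF (string.toList.length + 1) string.toList = s0 :: rest := by
    cases h : splitTokF (string.toList.length + 1) string.toList with
    | nil => exact absurd h (splitTokF_ne_nil _ _)
    | cons s0 rest => exact ⟨s0, rest, rfl⟩
  rw [hs, loopBF_eq _ _ (by omega) s0 rest hs]
  cases hp : procA rest <;> simp [hp]
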